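-- pv_equiv track=rewrite | github.com/devrugu/digital-watermarking | watermarking.py | _parse_channels
-- ===== SOURCE A (Python) =====
-- from typing import Tuple, Optional, List
--
-- def _parse_channels(ch_str: str, color_ndim: int) -> List[int]:
--     """
--     Parse channel selection string into BGR indices.
--     Accepts: 'B', 'G', 'R', 'BG', 'BGR', 'B,G', case-insensitive.
--     If grayscale image, returns [-1] sentinel meaning single plane.
--     """
--     if color_ndim == 2:
--         return [-1]  # sentinel for grayscale
--     s = ch_str.replace(",", "").upper()
--     valid = {"B": 0, "G": 1, "R": 2}
--     seen = []
--     for c in s: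
--         if c not in valid:
--             raise ValueError("channels must be a combination of 'B','G','R'")
--         idx = valid[c]
--         if idx not in seen:
--             seen.append(idx)
--     if not seen:
--         raise ValueError("No valid channels parsed.")
--     return seen
-- ===== SOURCE B (Python) =====
-- def _parse_channels(ch_str: str, color_ndim: int) -> list:
--     """
--     Parse channel selection string into BGR indices.
--     Recursive decomposition: take the head channel, emit its index, and recurse
--     on the tail with every duplicate of the head filtered out (no 'seen' list).
--     """
--     if color_ndim == 2:
--         return [-1]  # sentinel for grayscale
--     mapping = {"B": 0, "G": 1, "R": 2}
--
--     def go(chars):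
--         if not chars:
--             return []
--         c = chars[0]
--         if c not in mapping:
--             raise ValueError("channels must be a combination of 'B','G','R'")
--         return [mapping[c]] + go([d for d in chars[1:] if d != c])
--
--     out = go(list(ch_str.replace(",", "").upper()))
--     if not out:
--         raise ValueError("No valid channels parsed.")
--     return out
-- ===== Notes on version B (the rewrite author's own statement) =====
-- stated objective: alternative
-- what changed: Replaces A's iterative loop with a 'seen' membership accumulator by a recursive head-and-filter dedup: emit the head channel's index, then recurse on the tail with every duplicate of the head filtered out, so no accumulator or membership test exists.
import Mathlib
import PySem

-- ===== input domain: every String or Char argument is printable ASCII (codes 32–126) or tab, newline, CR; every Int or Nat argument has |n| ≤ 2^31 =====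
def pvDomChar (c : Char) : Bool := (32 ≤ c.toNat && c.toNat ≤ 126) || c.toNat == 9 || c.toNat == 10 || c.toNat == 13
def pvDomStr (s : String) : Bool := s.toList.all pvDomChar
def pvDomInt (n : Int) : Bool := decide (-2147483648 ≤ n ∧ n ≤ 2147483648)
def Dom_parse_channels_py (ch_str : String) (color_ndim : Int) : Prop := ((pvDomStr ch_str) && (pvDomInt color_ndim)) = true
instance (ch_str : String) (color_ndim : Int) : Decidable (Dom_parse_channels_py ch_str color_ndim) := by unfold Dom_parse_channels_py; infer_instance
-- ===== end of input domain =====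

-- B replaces A's iterative 'seen'-accumulator dedup loop by a recursive head-and-filter decomposition (alternative, same cost).


-- ===== PORT A =====
-- valid = {"B": 0, "G": 1, "R": 2}
def pvValid : PySem.Dict Char Int :=
  PySem.Dict.ofList [('B', 0), ('G', 1), ('R', 2)]

-- Port of A. Where Python raises ValueError (invalid char / no channel parsed) the
-- loop step / result is a no-op; those inputs are excluded by Pre_parse_channels_py.
def parse_channels_py (ch_str : String) (color_ndim : Int) : List Int :=
  if color_ndim = 2 then [-1]
  else
    let s := PySem.Str.upper (PySem.Str.replace ch_str "," "")
    let seen := s.toList.foldl (fun seen c =>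
      if ¬ pvValid.contains c then seen      -- Python: raise ValueError (outside Pre_)
      else
        let idx := (pvValid.get? c).getD 0
        if idx ∈ seen then seen else seen ++ [idx]) []
    seen                                     -- Python raises if seen == [] (outside Pre_)

-- ===== PORT B =====
-- mapping = {"B": 0, "G": 1, "R": 2}
def pvMapping : PySem.Dict Char Int :=
  PySem.Dict.ofList [('B', 0), ('G', 1), ('R', 2)]

-- go(chars): emit the head's index, recurse on the tail with duplicates of the head filtered out.
def pvGo (chars : List Char) : List Int :=
  match chars with
  | [] => []
  | c :: rest =>
    if ¬ pvMapping.contains c then []        -- Python: raise ValueError (outside Pre_)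
    else ((pvMapping.get? c).getD 0) :: pvGo (rest.filter (fun d => d ≠ c))
termination_by chars.length
decreasing_by
  simp only [List.length_cons, List.length_unattach]
  exact Nat.lt_succ_of_le ((List.length_filter_le _ _).trans (by simp))

-- Port of B.
def parse_channels_py_alt (ch_str : String) (color_ndim : Int) : List Int :=
  if color_ndim = 2 then [-1]
  else
    let out := pvGo (PySem.Str.upper (PySem.Str.replace ch_str "," "")).toList
    out                                      -- Python raises if out == [] (outside Pre_)

-- ===== PRECONDITION & SPEC =====
-- Pre_ excludes exactly the inputs on which A raises ValueError: for color_ndim ≠ 2, the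
-- comma-stripped uppercased string must be nonempty and consist of 'B','G','R' only.
def Pre_parse_channels_py (ch_str : String) (color_ndim : Int) : Prop :=
  color_ndim = 2 ∨
    ((PySem.Str.upper (PySem.Str.replace ch_str "," "")).toList ≠ [] ∧
     ((PySem.Str.upper (PySem.Str.replace ch_str "," "")).toList.all
       (fun c => c == 'B' || c == 'G' || c == 'R')) = true)
instance (ch_str : String) (color_ndim : Int) : Decidable (Pre_parse_channels_py ch_str color_ndim) := by
  unfold Pre_parse_channels_py; infer_instance

def pvWitness_parse_channels_py : String × Int := ("B", 3)

def Spec_parse_channels_py (ch_str : String) (color_ndim : Int) (out : List Int) : Prop := out = parse_channels_py_alt ch_str color_ndim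
instance (ch_str : String) (color_ndim : Int) (out : List Int) : Decidable (Spec_parse_channels_py ch_str color_ndim out) := by unfold Spec_parse_channels_py; infer_instance

-- ===== CLAIM (what is proved, stated in full; the proofs are below) =====
def Claim_equal_parse_channels_py : Prop := ∀ (ch_str : String) (color_ndim : Int), Dom_parse_channels_py ch_str color_ndim → Pre_parse_channels_py ch_str color_ndim → Spec_parse_channels_py ch_str color_ndim (parse_channels_py ch_str color_ndim)

-- ===== LEMMAS AND PROOFS =====
-- the index map applied to a valid channel char
def pvIdx (c : Char) : Int := (pvValid.get? c).getD 0

lemma pvIdx_mem_map_iff {c : Char} {acc : List Char}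
    (hc : c = 'B' ∨ c = 'G' ∨ c = 'R')
    (hacc : ∀ d ∈ acc, d = 'B' ∨ d = 'G' ∨ d = 'R') :
    pvIdx c ∈ acc.map pvIdx ↔ c ∈ acc := by
  simp only [List.mem_map]
  constructor
  · rintro ⟨d, hd, hEq⟩
    have := hacc d hd
    rcases hc with rfl | rfl | rfl <;> rcases this with rfl | rfl | rfl <;>
      first | exact hd | (exfalso; revert hEq; decide)
  · exact fun h => ⟨c, h, rfl⟩

-- A's interleaved dedup loop equals (map pvIdx) of the Set.add fold, on valid chars.
lemma pvFold_eq (l acc : List Char)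
    (hl : ∀ c ∈ l, c = 'B' ∨ c = 'G' ∨ c = 'R')
    (hacc : ∀ d ∈ acc, d = 'B' ∨ d = 'G' ∨ d = 'R') :
    l.foldl (fun seen c =>
      if ¬ pvValid.contains c then seen
      else
        let idx := (pvValid.get? c).getD 0
        if idx ∈ seen then seen else seen ++ [idx]) (acc.map pvIdx)
    = (l.foldl PySem.Set.add acc).map pvIdx := by
  induction l generalizing acc with
  | nil => rfl
  | cons c t ih =>
    have hc : c = 'B' ∨ c = 'G' ∨ c = 'R' := hl c (by simp)
    have ht : ∀ x ∈ t, x = 'B' ∨ x = 'G' ∨ x = 'R' := fun x hx => hl x (by simp [hx])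
    have hcontains : pvValid.contains c = true := by
      rcases hc with rfl | rfl | rfl <;> decide
    have hidx : (pvValid.get? c).getD 0 = pvIdx c := by
      rcases hc with rfl | rfl | rfl <;> rfl
    simp only [List.foldl_cons, hcontains, hidx]
    by_cases hmem : c ∈ acc
    · have : pvIdx c ∈ acc.map pvIdx := (pvIdx_mem_map_iff hc hacc).mpr hmem
      rw [if_pos this]
      have hadd : PySem.Set.add acc c = acc := by
        simp [PySem.Set.add, PySem.Set.contains, hmem]
      rw [hadd]; exact ih acc ht hacc
    · have : pvIdx c ∉ acc.map pvIdx := fun h => hmem ((pvIdx_mem_map_iff hc hacc).mp h)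
      rw [if_neg this]
      have hadd : PySem.Set.add acc c = acc ++ [c] := by
        simp [PySem.Set.add, PySem.Set.contains, hmem]
      rw [hadd]
      have : acc.map pvIdx ++ [pvIdx c] = (acc ++ [c]).map pvIdx := by simp
      rw [this]
      exact ih (acc ++ [c]) ht (by intro d hd; rcases List.mem_append.mp hd with h | h
                                   · exact hacc d h
                                   · simp at h; subst h; exact hc)

-- filtering out duplicates of an already-seen element does not change the Set.add fold
lemma pvFold_filter (t : List Char) (acc : List Char) (c : Char) (hc : c ∈ acc) :
    t.foldl PySem.Set.add acc = (t.filter (fun d => d ≠ c)).foldl PySem.Set.add acc := by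
  induction t generalizing acc with
  | nil => rfl
  | cons d t ih =>
    by_cases hdc : d = c
    · subst hdc
      have : PySem.Set.add acc d = acc := by
        simp [PySem.Set.add, PySem.Set.contains, hc]
      simp [this, ih acc hc]
    · have hmem : c ∈ PySem.Set.add acc d := by
        unfold PySem.Set.add; split <;> simp [hc]
      simp [hdc, ih _ hmem]

-- an element absent from t can be pulled out of the accumulator
lemma pvFold_pull (t : List Char) (c : Char) (acc : List Char) (hct : c ∉ t) :
    t.foldl PySem.Set.add (c :: acc) = c :: t.foldl PySem.Set.add acc := by
  induction t generalizing acc with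
  | nil => rfl
  | cons d t ih =>
    have hdc : ¬ (d = c) := fun h => hct (by simp [h])
    have hct' : c ∉ t := fun h => hct (by simp [h])
    have hcont : PySem.Set.contains (c :: acc) d = PySem.Set.contains acc d := by
      simp [PySem.Set.contains, hdc]
    by_cases h : PySem.Set.contains acc d = true
    · simp only [List.foldl_cons, PySem.Set.add, hcont, h, if_true]
      exact ih acc hct'
    · simp only [List.foldl_cons, PySem.Set.add, hcont, h]
      have : (c :: acc) ++ [d] = c :: (acc ++ [d]) := by simp
      rw [this]
      exact ih (acc ++ [d]) hct'

-- B's recursive head-and-filter dedup equals (map pvIdx) of the Set.add fold, on valid chars.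
lemma pvGo_eq (l : List Char)
    (hl : ∀ c ∈ l, c = 'B' ∨ c = 'G' ∨ c = 'R') :
    pvGo l = (l.foldl PySem.Set.add []).map pvIdx := by
  induction hn : l.length using Nat.strong_induction_on generalizing l with
  | _ n ih =>
    match l, hn with
    | [], _ => simp [pvGo]
    | c :: t, hn =>
      have hc : c = 'B' ∨ c = 'G' ∨ c = 'R' := hl c (by simp)
      have hcontains : pvMapping.contains c = true := by
        rcases hc with rfl | rfl | rfl <;> decide
      have hidx : (pvMapping.get? c).getD 0 = pvIdx c := by
        rcases hc with rfl | rfl | rfl <;> rfl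
      rw [pvGo, if_neg (not_not_intro hcontains)]
      simp only [hidx]
      set t' := t.filter (fun d => d ≠ c) with ht'
      have hlen : t'.length < n := by
        rw [← hn]
        exact Nat.lt_succ_of_le (List.length_filter_le _ _)
      have ht'valid : ∀ x ∈ t', x = 'B' ∨ x = 'G' ∨ x = 'R' := by
        intro x hx; exact hl x (by simp [ht'] at hx; simp [hx.1])
      have hrec := ih t'.length hlen t' ht'valid rfl
      rw [hrec]
      have hnott' : c ∉ t' := by simp [ht']
      have h1 : (c :: t).foldl PySem.Set.add [] = t.foldl PySem.Set.add [c] := by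
        simp [PySem.Set.add, PySem.Set.contains]
      have h2 : t.foldl PySem.Set.add [c] = t'.foldl PySem.Set.add [c] :=
        pvFold_filter t [c] c (by simp)
      have h3 : t'.foldl PySem.Set.add [c] = c :: t'.foldl PySem.Set.add [] := by
        have := pvFold_pull t' c [] hnott'
        simpa using this
      rw [h1, h2, h3]
      simp

-- ===== VERDICT (by name: the statement is the Claim_ definition above) =====
theorem parse_channels_py_spec : Claim_equal_parse_channels_py := by
  intro ch_str color_ndim _ hpre
  unfold Spec_parse_channels_py parse_channels_py parse_channels_py_alt
  by_cases h2 : color_ndim = 2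
  · simp [h2]
  · rcases hpre with h | ⟨_, hallb⟩
    · exact absurd h h2
    · have hall : ∀ c ∈ (PySem.Str.upper (PySem.Str.replace ch_str "," "")).toList,
          c = 'B' ∨ c = 'G' ∨ c = 'R' := by
        intro c hc
        have h3 := List.all_eq_true.mp hallb c hc
        simp only [Bool.or_eq_true, beq_iff_eq] at h3
        exact or_assoc.mp h3
      simp only [h2, if_false]
      have hA := pvFold_eq ((PySem.Str.upper (PySem.Str.replace ch_str "," "")).toList) [] hall (by simp)
      simp only [List.map_nil] at hA
      rw [hA, pvGo_eq _ hall]
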